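-- pv_equiv track=rewrite | github.com/nikesh15x/3d_task | pythonTask/ListCompression.py | even_squared
-- ===== SOURCE A (Python) =====
-- def even_squared(n):
--     try:
--         if not isinstance(n, int):
--             raise TypeError("input must be an integer")
--         sq_list = [i**2 for i in range(1, n + 1) if i % 2 == 0]
--         return sq_list
--     except Exception as e:
--         return e
-- ===== SOURCE B (Python) =====
-- def even_squared(n):
--     if not isinstance(n, int):
--         return TypeError("input must be an integer")
--     return [4 * k * k for k in range(1, n // 2 + 1)]
-- ===== Notes on version B (the rewrite author's own statement) =====
-- stated objective: alternative
-- what changed: B iterates over the positions of the even numbers (a range half as long) and computes each element directly as the square of twice the position, instead of A's filter of the full range by a parity test followed by squaring; B also returns the TypeError directly instead of raise-and-catch.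
import Mathlib
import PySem

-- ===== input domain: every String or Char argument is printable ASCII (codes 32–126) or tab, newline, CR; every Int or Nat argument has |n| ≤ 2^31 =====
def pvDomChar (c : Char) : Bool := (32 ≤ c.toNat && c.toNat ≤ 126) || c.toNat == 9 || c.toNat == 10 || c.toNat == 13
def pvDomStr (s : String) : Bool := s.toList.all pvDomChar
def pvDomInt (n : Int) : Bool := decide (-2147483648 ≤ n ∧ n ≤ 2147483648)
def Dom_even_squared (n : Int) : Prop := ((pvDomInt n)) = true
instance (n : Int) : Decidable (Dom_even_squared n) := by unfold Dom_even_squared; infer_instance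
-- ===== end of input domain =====

-- B enumerates the even numbers by index k in range(1, n//2+1), emitting 4*k*k,
-- instead of A's parity-filtered squaring of the full range 1..n. (alternative decomposition)

-- ===== PORT A =====
-- [i**2 for i in range(1, n + 1) if i % 2 == 0]   (the isinstance/TypeError branch is
-- unreachable for an Int argument, so the port is the comprehension itself)
def even_squared (n : Int) : List Int :=
  ((PySem.List.pyRange 1 (n + 1) 1).filter (fun i => PySem.Int.mod i 2 == 0)).map
    (fun i => i ^ 2)

-- ===== PORT B =====
-- [4 * k * k for k in range(1, n // 2 + 1)]
def even_squared_alt (n : Int) : List Int :=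
  (PySem.List.pyRange 1 (PySem.Int.floordiv n 2 + 1) 1).map (fun k => 4 * k * k)

-- ===== PRECONDITION & SPEC =====
def Spec_even_squared (n : Int) (out : List Int) : Prop := out = even_squared_alt n
instance (n : Int) (out : List Int) : Decidable (Spec_even_squared n out) := by unfold Spec_even_squared; infer_instance

-- ===== CLAIM (what is proved, stated in full; the proofs are below) =====
def Claim_equal_even_squared : Prop := ∀ (n : Int), Dom_even_squared n → Spec_even_squared n (even_squared n)

-- ===== LEMMAS AND PROOFS =====

lemma even_squared_nat (N : Nat) : even_squared (N : Int) = even_squared_alt (N : Int) := by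
  induction N with
  | zero => decide
  | succ N ih =>
    unfold even_squared even_squared_alt at *
    push_cast
    rw [PySem.List.pyRange_one_succ_right (by omega : (1:Int) ≤ (N:Int) + 1),
        List.filter_append, List.map_append, ih]
    have hmod : PySem.Int.mod ((N : Int) + 1) 2 = (((N + 1) % 2 : Nat) : Int) := by
      have := PySem.Int.mod_natCast (N + 1) 2
      push_cast at this ⊢
      exact this
    have hdiv1 : PySem.Int.floordiv ((N : Int) + 1) 2 = (((N + 1) / 2 : Nat) : Int) := by
      have := PySem.Int.floordiv_natCast (N + 1) 2
      push_cast at this ⊢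
      exact this
    have hdiv0 : PySem.Int.floordiv (N : Int) 2 = ((N / 2 : Nat) : Int) :=
      PySem.Int.floordiv_natCast N 2
    rcases Nat.even_or_odd N with ⟨m, hm⟩ | ⟨m, hm⟩
    · -- N = 2m, so N+1 is odd: the new element is filtered out, and (N+1)/2 = N/2
      subst hm
      have hfil : (List.filter (fun i => PySem.Int.mod i 2 == 0) [(↑(m + m) : Int) + 1]) = [] := by
        have h2 : (m + m + 1) % 2 = 1 := by omega
        simp only [List.filter_cons, List.filter_nil, hmod, h2]
        norm_num
      rw [hfil]
      have : ((m + m + 1) / 2 : Nat) = ((m + m) / 2 : Nat) := by omega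
      rw [hdiv1, hdiv0, this]
      simp
    · -- N = 2m+1, so N+1 = 2m+2 is even: both sides gain one element
      subst hm
      have hfil : (List.filter (fun i => PySem.Int.mod i 2 == 0) [(↑(2 * m + 1) : Int) + 1])
          = [(↑(2 * m + 1) : Int) + 1] := by
        have h2 : (2 * m + 1 + 1) % 2 = 0 := by omega
        simp only [List.filter_cons, List.filter_nil, hmod, h2]
        norm_num
      rw [hfil, hdiv1, hdiv0]
      have e1 : ((2 * m + 1 + 1) / 2 : Nat) = (2 * m + 1) / 2 + 1 := by omega
      rw [e1]
      have e2 : ((((2 * m + 1) / 2 + 1 : Nat)) : Int) + 1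
          = ((((2 * m + 1) / 2 : Nat)) : Int) + 1 + 1 := by push_cast; ring
      rw [e2, PySem.List.pyRange_one_succ_right
            (by omega : (1:Int) ≤ ((((2 * m + 1) / 2 : Nat)) : Int) + 1),
          List.map_append]
      have e3 : ((2 * m + 1) / 2 : Nat) = m := by omega
      simp [e3]
      ring

lemma even_squared_neg (n : Int) (hn : n < 0) : even_squared n = even_squared_alt n := by
  unfold even_squared even_squared_alt
  have h1 : PySem.List.pyRange 1 (n + 1) 1 = [] :=
    PySem.List.pyRange_one_eq_nil (by omega)
  have hq : PySem.Int.floordiv n 2 < 0 :=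
    (PySem.Int.floordiv_lt_iff_lt_mul (by omega)).mpr (by omega)
  have h2 : PySem.List.pyRange 1 (PySem.Int.floordiv n 2 + 1) 1 = [] :=
    PySem.List.pyRange_one_eq_nil (by omega)
  rw [h1, h2]
  simp

-- ===== VERDICT (by name: the statement is the Claim_ definition above) =====
theorem even_squared_spec : Claim_equal_even_squared := by
  intro n _
  unfold Spec_even_squared
  rcases le_or_gt 0 n with h | h
  · obtain ⟨N, rfl⟩ := Int.eq_ofNat_of_zero_le h
    exact even_squared_nat N
  · exact even_squared_neg n h
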